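-- pv_equiv track=rewrite | github.com/satheesh-chiploop/chiploop-saas | backend/agents/system/system_top_assembly_agent.py | _port_alias_candidates
-- ===== SOURCE A (Python) =====
-- def _port_alias_candidates(port: str):
--     p = (port or "").strip()
--     if not p:
--         return []
--     out = [p]
--     family = {
--         "rst_n": ["reset_n", "resetn", "rstn", "aresetn"],
--         "reset_n": ["rst_n", "resetn", "rstn", "aresetn"],
--         "rst": ["reset"],
--         "reset": ["rst"],
--     }
--     out.extend(family.get(p, []))
--     # reverse lookup
--     for k, vals in family.items():
--         if p in vals and k not in out:
--             out.append(k)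
--     dedup = []
--     for x in out:
--         if x not in dedup:
--             dedup.append(x)
--     return dedup
-- ===== SOURCE B (Python) =====
-- _FAMILY = {
--     "rst_n": ["reset_n", "resetn", "rstn", "aresetn"],
--     "reset_n": ["rst_n", "resetn", "rstn", "aresetn"],
--     "rst": ["reset"],
--     "reset": ["rst"],
-- }
--
-- # Symmetric alias adjacency, precomputed once from _FAMILY.
-- _ADJ = {}
-- for _k, _vals in _FAMILY.items():
--     for _v in _vals:
--         for _a, _b in ((_k, _v), (_v, _k)):
--             _lst = _ADJ.setdefault(_a, [])
--             if _b not in _lst: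
--                 _lst.append(_b)
--
--
-- def _port_alias_candidates(port: str):
--     p = (port or "").strip()
--     if not p:
--         return []
--     return list(dict.fromkeys([p] + _ADJ.get(p, [])))
-- ===== Notes on version B (the rewrite author's own statement) =====
-- stated objective: simpler
-- what changed: B precomputes one symmetric alias-adjacency table from the family dict once at module load, so each query is a single dict lookup plus an order-preserving dedup instead of A's per-call reverse scan over the family and manual dedup loop.
import Mathlib
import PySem

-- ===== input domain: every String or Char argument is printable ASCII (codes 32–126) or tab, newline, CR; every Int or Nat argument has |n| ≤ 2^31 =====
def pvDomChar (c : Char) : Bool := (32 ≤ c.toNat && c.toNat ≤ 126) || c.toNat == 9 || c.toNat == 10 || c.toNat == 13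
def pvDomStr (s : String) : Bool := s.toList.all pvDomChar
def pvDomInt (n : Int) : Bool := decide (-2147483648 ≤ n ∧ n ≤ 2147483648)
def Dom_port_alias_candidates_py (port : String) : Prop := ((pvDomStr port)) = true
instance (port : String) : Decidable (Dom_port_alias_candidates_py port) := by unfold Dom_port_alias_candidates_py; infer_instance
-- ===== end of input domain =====

-- B precomputes one symmetric alias-adjacency table so the query is a single lookup plus dedup (simpler; no per-call reverse scan).

-- ===== PORT A =====
def pvFamily : PySem.Dict String (List String) :=
  PySem.Dict.ofList
    [ ("rst_n",   ["reset_n", "resetn", "rstn", "aresetn"])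
    , ("reset_n", ["rst_n", "resetn", "rstn", "aresetn"])
    , ("rst",     ["reset"])
    , ("reset",   ["rst"]) ]

def port_alias_candidates_py (port : String) : List String :=
  let p := PySem.Str.strip port              -- (port or "").strip(): "" is the only falsy str
  if p = "" then []
  else
    let out := [p] ++ pvFamily.getD p []     -- out = [p]; out.extend(family.get(p, []))
    -- reverse lookup: for k, vals in family.items(): if p in vals and k not in out: out.append(k)
    let out := pvFamily.items.foldl
      (fun out kv => if p ∈ kv.2 ∧ kv.1 ∉ out then out ++ [kv.1] else out) out
    -- dedup = []; for x in out: if x not in dedup: dedup.append(x)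
    out.foldl (fun dedup x => if x ∈ dedup then dedup else dedup ++ [x]) []

-- ===== PORT B =====
def pvFamilyB : PySem.Dict String (List String) :=
  PySem.Dict.ofList
    [ ("rst_n",   ["reset_n", "resetn", "rstn", "aresetn"])
    , ("reset_n", ["rst_n", "resetn", "rstn", "aresetn"])
    , ("rst",     ["reset"])
    , ("reset",   ["rst"]) ]

-- _lst = _ADJ.setdefault(a, []); if b not in _lst: _lst.append(b)
def pvAddEdge (adj : PySem.Dict String (List String)) (a b : String) :
    PySem.Dict String (List String) :=
  let lst := adj.getD a []
  if b ∈ lst then adj else adj.insert a (lst ++ [b])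

-- for k, vals in _FAMILY.items(): for v in vals: add edge k→v then v→k
def pvAdj : PySem.Dict String (List String) :=
  pvFamilyB.items.foldl
    (fun adj kv => kv.2.foldl (fun adj v => pvAddEdge (pvAddEdge adj kv.1 v) v kv.1) adj)
    PySem.Dict.empty

def port_alias_candidates_py_alt (port : String) : List String :=
  let p := PySem.Str.strip port
  if p = "" then []
  else PySem.List.dedup (p :: pvAdj.getD p [])   -- list(dict.fromkeys([p] + _ADJ.get(p, [])))

-- ===== PRECONDITION & SPEC =====
def Spec_port_alias_candidates_py (port : String) (out : List String) : Prop := out = port_alias_candidates_py_alt port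
instance (port : String) (out : List String) : Decidable (Spec_port_alias_candidates_py port out) := by unfold Spec_port_alias_candidates_py; infer_instance

-- ===== CLAIM (what is proved, stated in full; the proofs are below) =====
def Claim_equal_port_alias_candidates_py : Prop := ∀ (port : String), Dom_port_alias_candidates_py port → Spec_port_alias_candidates_py port (port_alias_candidates_py port)

-- ===== LEMMAS AND PROOFS =====

set_option maxRecDepth 4096 in
-- both programs depend only on p = strip(port); prove the bodies equal for every p
theorem pv_core_eq (p : String) :
    (if p = "" then []
     else
       let out := [p] ++ pvFamily.getD p []
       let out := pvFamily.items.foldl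
         (fun out kv => if p ∈ kv.2 ∧ kv.1 ∉ out then out ++ [kv.1] else out) out
       out.foldl (fun dedup x => if x ∈ dedup then dedup else dedup ++ [x]) [])
    = (if p = "" then [] else PySem.List.dedup (p :: pvAdj.getD p [])) := by
  by_cases h0 : p = ""
  · simp [h0]
  · by_cases h1 : p = "rst_n"; · subst h1; decide
    by_cases h2 : p = "reset_n"; · subst h2; decide
    by_cases h3 : p = "rst"; · subst h3; decide
    by_cases h4 : p = "reset"; · subst h4; decide
    by_cases h5 : p = "resetn"; · subst h5; decide
    by_cases h6 : p = "rstn"; · subst h6; decide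
    by_cases h7 : p = "aresetn"; · subst h7; decide
    have hfam : pvFamily = PySem.Dict.mk
        [ ("rst_n",   ["reset_n", "resetn", "rstn", "aresetn"])
        , ("reset_n", ["rst_n", "resetn", "rstn", "aresetn"])
        , ("rst",     ["reset"])
        , ("reset",   ["rst"]) ] := by decide
    have hadj : pvAdj = PySem.Dict.mk
        [ ("rst_n",   ["reset_n", "resetn", "rstn", "aresetn"])
        , ("reset_n", ["rst_n", "resetn", "rstn", "aresetn"])
        , ("resetn",  ["rst_n", "reset_n"])
        , ("rstn",    ["rst_n", "reset_n"])
        , ("aresetn", ["rst_n", "reset_n"])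
        , ("rst",     ["reset"])
        , ("reset",   ["rst"]) ] := by decide
    simp [h0, hfam, hadj, PySem.Dict.getD, PySem.Dict.get?,
      PySem.List.dedup, PySem.Set.ofList, PySem.Set.add, List.foldl,
      h1, h2, h3, h4, h5, h6, h7,
      Ne.symm h1, Ne.symm h2, Ne.symm h3, Ne.symm h4, Ne.symm h5, Ne.symm h6, Ne.symm h7]

-- ===== VERDICT (by name: the statement is the Claim_ definition above) =====
theorem port_alias_candidates_py_spec : Claim_equal_port_alias_candidates_py := by
  intro port _
  unfold Spec_port_alias_candidates_py port_alias_candidates_py port_alias_candidates_py_alt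
  exact pv_core_eq (PySem.Str.strip port)
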